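-- pv_equiv track=rewrite | github.com/Tom-Souillard/daily_algorithmic_mastery | 01-midway/midway_convert_an_array/convert_an_array.py | findMatrix
-- ===== SOURCE A (Python) =====
-- from typing import List
--
-- def findMatrix(nums: List[int]) -> List[List[int]]:
--     """
--     Create a 2D array from the given list of integers, ensuring each row has distinct integers
--     and the number of rows is minimal.
--
--     Args:
--     nums (List[int]): The list of integers to convert into a 2D array.
--
--     Returns:
--     List[List[int]]: The resulting 2D array with minimal rows and distinct integers in each row.
--     """
--     from collections import Counter
--
--     frequences = Counter(nums)
--     matrice = []
--     for valeur, freq in frequences.items():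
--         for i in range(freq):
--             if i == len(matrice):
--                 matrice.append([])
--             matrice[i].append(valeur)
--
--     return matrice
-- ===== SOURCE B (Python) =====
-- from typing import List
--
-- def findMatrix(nums: List[int]) -> List[List[int]]:
--     # Row-by-row construction: row i holds every distinct value occurring more than i times.
--     from collections import Counter
--     freq = Counter(nums)
--     m = max(freq.values(), default=0)
--     return [[v for v, c in freq.items() if c > i] for i in range(m)]
-- ===== Notes on version B (the rewrite author's own statement) =====
-- stated objective: alternative
-- what changed: B transposes the loops: instead of A distributing each value into rows occurrence-by-occurrence (growing the matrix as it goes), B computes the row count as the maximum frequency and builds each row i in one pass as the distinct values whose count exceeds i.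
import Mathlib
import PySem

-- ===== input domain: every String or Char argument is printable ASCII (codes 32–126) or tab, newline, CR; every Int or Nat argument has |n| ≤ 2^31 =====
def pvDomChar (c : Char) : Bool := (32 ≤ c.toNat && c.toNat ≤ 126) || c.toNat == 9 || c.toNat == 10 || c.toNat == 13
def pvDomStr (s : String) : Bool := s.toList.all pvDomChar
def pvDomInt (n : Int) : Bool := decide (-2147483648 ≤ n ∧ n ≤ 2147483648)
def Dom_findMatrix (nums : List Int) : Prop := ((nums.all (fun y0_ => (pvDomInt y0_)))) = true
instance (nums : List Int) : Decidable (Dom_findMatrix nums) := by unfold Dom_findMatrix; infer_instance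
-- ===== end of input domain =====

-- B builds the matrix row-by-row (row i = values with count > i) instead of A's per-value
-- distribution into rows; same return value, a different decomposition (objective: alternative).

-- ===== PORT A =====
-- inner 'for i in range(freq)' body: i is always in range after the growth branch, so
-- 'getD/set' render Python's 'matrice[i].append(valeur)' exactly on every reached state.
def findMatrixStep (valeur : Int) (matrice : List (List Int)) (i : Int) : List (List Int) :=
  let matrice := if i = (matrice.length : Int) then matrice ++ [[]] else matrice
  matrice.set i.toNat ((matrice.getD i.toNat []) ++ [valeur])

def findMatrix (nums : List Int) : List (List Int) :=
  let frequences := PySem.Dict.counter nums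
  frequences.items.foldl
    (fun matrice p => (PySem.List.pyRange 0 p.2 1).foldl (findMatrixStep p.1) matrice) []

-- ===== PORT B =====
def findMatrix_alt (nums : List Int) : List (List Int) :=
  let freq := PySem.Dict.counter nums
  let m := PySem.List.maxD freq.values (fun x => x) 0
  (PySem.List.pyRange 0 m 1).map (fun i => (freq.items.filter (fun p => p.2 > i)).map Prod.fst)

-- ===== PRECONDITION & SPEC =====
def Spec_findMatrix (nums : List Int) (out : List (List Int)) : Prop := out = findMatrix_alt nums
instance (nums : List Int) (out : List (List Int)) : Decidable (Spec_findMatrix nums out) := by unfold Spec_findMatrix; infer_instance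

-- ===== CLAIM (what is proved, stated in full; the proofs are below) =====
def Claim_equal_findMatrix : Prop := ∀ (nums : List Int), Dom_findMatrix nums → Spec_findMatrix nums (findMatrix nums)

-- ===== LEMMAS AND PROOFS =====

-- running maximum of the counts (0 when empty), as A's loop reaches it and B computes it
def maxCnt (L : List (Int × Int)) : Int := L.foldl (fun a p => max a p.2) 0

-- the matrix described by an items prefix L: row i lists the values of L with count > i
def build (L : List (Int × Int)) : List (List Int) :=
  (PySem.List.pyRange 0 (maxCnt L) 1).map (fun i => ((L.filter (fun p => i < p.2)).map Prod.fst))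

theorem maxCnt_nonneg (L : List (Int × Int)) : 0 ≤ maxCnt L :=
  (PySem.List.le_foldl_max_int L (·.2) 0).1

theorem le_maxCnt {L : List (Int × Int)} {p : Int × Int} (h : p ∈ L) : p.2 ≤ maxCnt L :=
  (PySem.List.le_foldl_max_int L (·.2) 0).2 p h

theorem maxCnt_append (L : List (Int × Int)) (p : Int × Int) :
    maxCnt (L ++ [p]) = max (maxCnt L) p.2 := by
  simp [maxCnt]

theorem length_build (L : List (Int × Int)) : (build L).length = (maxCnt L).toNat := by
  simp [build]

theorem getD_build (L : List (Int × Int)) (j : Nat) :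
    (build L).getD j [] = (L.filter (fun p => (j : Int) < p.2)).map Prod.fst := by
  by_cases hj : j < (maxCnt L).toNat
  · rw [List.getD_eq_getElem _ [] (by simpa [length_build] using hj)]
    simp only [build, List.getElem_map, PySem.List.getElem_pyRange_one, zero_add]
  · rw [List.getD_eq_default _ _ (by simpa [length_build] using hj)]
    rw [eq_comm, List.map_eq_nil_iff, List.filter_eq_nil_iff]
    intro p hp
    have h1 := le_maxCnt hp
    have h2 : (maxCnt L) ≤ (j : Int) := by
      have := maxCnt_nonneg L; omega
    simp only [decide_eq_true_eq]
    omega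

-- the two shapes of one inner-loop step: grow-then-append, or append into an existing row
theorem step_grow (v : Int) (R : List (List Int)) :
    findMatrixStep v R (R.length : Int) = R ++ [[v]] := by
  simp only [findMatrixStep, if_true, Int.toNat_natCast]
  have hg : (R ++ [[]]).getD R.length [] = [] := by
    rw [List.getD_eq_getElem _ [] (by simp)]
    simp
  rw [hg, List.nil_append]
  apply List.ext_getElem (by simp)
  intro j h1 h2
  rw [List.getElem_set]
  by_cases hje : R.length = j
  · subst hje
    simp [List.getElem_append_right (by omega : R.length ≤ R.length)]
  · have hjR : j < R.length := by simp at h1; omega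
    simp [hje, List.getElem_append_left hjR]

theorem step_in (v : Int) (R : List (List Int)) (n : Nat) (h : n < R.length) :
    findMatrixStep v R (n : Int) = R.set n (R.getD n [] ++ [v]) := by
  simp only [findMatrixStep, if_neg (by omega : ¬ (n : Int) = (R.length : Int)), Int.toNat_natCast]

-- inner loop: distributing v into the first n rows (growing the matrix as needed)
theorem inner_loop (v : Int) (n : Nat) (m : List (List Int)) :
    (PySem.List.pyRange 0 (n : Int) 1).foldl (findMatrixStep v) m =
      (List.range (max m.length n)).map
        (fun j => if j < n then m.getD j [] ++ [v] else m.getD j []) := by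
  induction n with
  | zero =>
    simp only [Nat.cast_zero, PySem.List.pyRange_one_eq_nil le_rfl, List.foldl_nil, Nat.max_zero]
    apply List.ext_getElem (by simp)
    intro j h1 h2
    simp only [List.getElem_map, List.getElem_range]
    rw [if_neg (by omega), List.getD_eq_getElem _ [] h1]
  | succ n ih =>
    have hc : ((n : Int) + 1) = ((n + 1 : Nat) : Int) := by push_cast; ring
    rw [← hc, PySem.List.pyRange_one_succ_right (by positivity), List.foldl_append, ih]
    simp only [List.foldl_cons, List.foldl_nil]
    generalize hRdef : (List.range (max m.length n)).map
        (fun j => if j < n then m.getD j [] ++ [v] else m.getD j []) = R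
    have hRlen : R.length = max m.length n := by rw [← hRdef]; simp
    have hget : ∀ j : Nat, j < max m.length n →
        R.getD j [] = if j < n then m.getD j [] ++ [v] else m.getD j [] := by
      intro j hj
      rw [← hRdef, List.getD_eq_getElem _ [] (by simp; omega)]
      simp
    by_cases hmn : m.length ≤ n
    · -- row n is fresh: the step appends [[v]]
      have hlen : R.length = n := by omega
      rw [show (n : Int) = (R.length : Int) by rw [hlen], step_grow]
      apply List.ext_getElem (by simp [hlen]; omega)
      intro j h1 h2
      have hj1 : j < n + 1 := by simp [hlen] at h1; omega
      simp only [List.getElem_map, List.getElem_range]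
      by_cases hje : j = n
      · subst hje
        rw [List.getElem_append_right (by omega : R.length ≤ j)]
        rw [if_pos hj1, List.getD_eq_default _ _ (by omega : m.length ≤ j)]
        simp [hlen]
      · have hjn : j < n := by omega
        rw [List.getElem_append_left (by omega : j < R.length),
            ← List.getD_eq_getElem R [] (by omega), hget j (by omega)]
        simp [hjn, hj1]
    · -- row n already exists: only it changes
      have hnR : n < R.length := by omega
      rw [step_in v R n hnR]
      apply List.ext_getElem (by simp [hRlen]; omega)
      intro j h1 h2
      rw [List.getElem_set]
      have hjlt : j < max m.length n := by simp [hRlen] at h1; omega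
      simp only [List.getElem_map, List.getElem_range]
      by_cases hje : n = j
      · subst hje
        rw [if_pos rfl, hget n (by omega), if_neg (by omega : ¬ n < n),
            if_pos (by omega : n < n + 1)]
      · rw [if_neg hje, ← List.getD_eq_getElem R [] (by omega), hget j hjlt]
        by_cases hj2 : j < n
        · rw [if_pos hj2, if_pos (by omega)]
        · rw [if_neg hj2, if_neg (by omega)]

-- outer loop: A's fold over the items equals the row description
theorem outer_loop (L : List (Int × Int)) (hpos : ∀ p ∈ L, 1 ≤ p.2) :
    L.foldl (fun matrice p => (PySem.List.pyRange 0 p.2 1).foldl (findMatrixStep p.1) matrice) []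
      = build L := by
  induction L using List.reverseRecOn with
  | nil => simp [build, maxCnt]
  | append_singleton L p ih =>
    have hpos' : ∀ q ∈ L, 1 ≤ q.2 := fun q hq => hpos q (by simp [hq])
    have hp : 1 ≤ p.2 := hpos p (by simp)
    rw [List.foldl_append, ih hpos']
    simp only [List.foldl_cons, List.foldl_nil]
    have hcast : (p.2 : Int) = ((p.2.toNat : Nat) : Int) := by omega
    rw [hcast, inner_loop]
    apply List.ext_getElem
    · simp [length_build, maxCnt_append]
      omega
    · intro j h1 h2
      simp only [List.getElem_map, List.getElem_range]
      have hgb := getD_build L j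
      have hgb' := getD_build (L ++ [p]) j
      have hfil : (L ++ [p]).filter (fun q => (j : Int) < q.2)
          = L.filter (fun q => (j : Int) < q.2) ++ if (j : Int) < p.2 then [p] else [] := by
        simp [List.filter_append]
        split_ifs with h <;> simp [List.filter, h]
      have hRHS : (build (L ++ [p]))[j] = ((L ++ [p]).filter (fun q => (j : Int) < q.2)).map Prod.fst := by
        rw [← List.getD_eq_getElem _ [] h2, hgb']
      rw [hRHS, hfil, List.map_append, hgb]
      by_cases hj : j < p.2.toNat
      · simp [hj, (by omega : (j : Int) < p.2)]
      · simp [hj]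
        omega

-- B's max over the values equals maxCnt of the items, given all counts are ≥ 1
theorem maxD_values (L : List (Int × Int)) (hpos : ∀ p ∈ L, 1 ≤ p.2) :
    PySem.List.maxD (L.map Prod.snd) (fun x => x) 0 = maxCnt L := by
  cases L with
  | nil =>
    rw [maxCnt, List.foldl_nil]
    simp [PySem.List.maxD, (PySem.List.max?_eq_none_iff (xs := ([] : List Int)) (key := fun x => x)).mpr rfl]
  | cons q t =>
    have h1 : 1 ≤ q.2 := hpos q (by simp)
    have : PySem.List.maxD ((q :: t).map Prod.snd) (fun x => x) 0 = (t.map Prod.snd).foldl max q.2 := by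
      have := PySem.List.max?_id_cons (x := q.2) (t := t.map Prod.snd)
      simp [PySem.List.maxD, this]
    rw [this, maxCnt]
    simp only [List.foldl_cons, List.foldl_map]
    rw [(by omega : max 0 q.2 = q.2)]

-- ===== VERDICT (by name: the statement is the Claim_ definition above) =====
theorem findMatrix_spec : Claim_equal_findMatrix := by
  intro nums _
  unfold Spec_findMatrix findMatrix findMatrix_alt
  have hitems : (PySem.Dict.counter nums).items
      = (PySem.Set.ofList nums).map (fun k => (k, (nums.count k : Int))) :=
    PySem.Dict.items_counter nums
  have hpos : ∀ p ∈ (PySem.Dict.counter nums).items, 1 ≤ p.2 := by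
    rw [hitems]
    intro p hp
    obtain ⟨k, hk, rfl⟩ := List.mem_map.mp hp
    have : k ∈ nums := (PySem.Set.mem_ofList _ _).mp hk
    have := List.count_pos_iff.mpr this
    simp; omega
  rw [outer_loop _ hpos]
  dsimp only
  have hvals : (PySem.Dict.counter nums).values = (PySem.Dict.counter nums).items.map Prod.snd := rfl
  rw [hvals, maxD_values _ hpos, build]
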